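-- pv_equiv track=rewrite | github.com/luv1327/Scaler_Dsa | IntermediateDsa2/subsetsAndSubsequences.py | findAllSubsetsSumBruteForce
-- ===== SOURCE A (Python) =====
-- def checkBit(n,i):
--     if (n >> i & 1) == 1:
--         return True
--     return False
--
-- def findAllSubsetsSumBruteForce(A):
--     n = 2 ** len(A)
--     ans = []
--     for i in range(n):
--         curr_sum = 0
--         for j in range(len(A)):
--             if checkBit(i,j):
--                 curr_sum += A[j]
--         ans.append(curr_sum)
--     return sum(ans)
-- ===== SOURCE B (Python) =====
-- def findAllSubsetsSumBruteForce(A):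
--     # Closed form: each element occurs in exactly 2**(len(A)-1) subsets,
--     # and 2 ** len(A) // 2 equals that count (and is 0 for the empty list,
--     # where the sum is 0 anyway).
--     return 2 ** len(A) // 2 * sum(A)
-- ===== Notes on version B (the rewrite author's own statement) =====
-- stated objective: faster
-- what changed: Replaces the enumeration of all 2^n bitmask subsets and their inner per-bit sums by the closed form 2**len(A)//2 * sum(A) (each element lies in exactly 2^(n-1) subsets).
import Mathlib
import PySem

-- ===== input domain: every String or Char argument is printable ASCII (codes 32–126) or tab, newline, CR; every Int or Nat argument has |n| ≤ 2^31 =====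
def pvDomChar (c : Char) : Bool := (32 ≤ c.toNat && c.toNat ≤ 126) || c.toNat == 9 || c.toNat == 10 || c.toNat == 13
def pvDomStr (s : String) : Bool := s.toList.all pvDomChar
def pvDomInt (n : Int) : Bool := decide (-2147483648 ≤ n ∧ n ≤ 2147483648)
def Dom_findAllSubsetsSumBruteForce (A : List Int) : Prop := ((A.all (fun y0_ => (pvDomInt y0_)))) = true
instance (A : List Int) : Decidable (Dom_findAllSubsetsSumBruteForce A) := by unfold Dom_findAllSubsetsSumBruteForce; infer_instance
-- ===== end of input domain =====

-- B replaces A's enumeration of all 2^n bitmask subsets by the closed form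
-- 2^len(A)//2 * sum(A); objective: faster (asymptotic, O(n) vs O(n*2^n)).


-- ===== PORT A =====
-- 'n >> i & 1' : Python's right shift; every call site passes i ∈ range(len(A)), so i ≥ 0,
-- where 'n >>> i.toNat' is exact.
def checkBit (n i : Int) : Bool :=
  if Int.land (n >>> i.toNat) 1 == 1 then true else false

def findAllSubsetsSumBruteForce (A : List Int) : Int :=
  let n : Int := 2 ^ A.length
  let ans : List Int := (PySem.List.pyRange 0 n 1).foldl (fun ans i =>
      let currSum : Int := (PySem.List.pyRange 0 (A.length : Int) 1).foldl
        (fun currSum j => if checkBit i j then currSum + PySem.List.pyGetD A j 0 else currSum) 0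
      ans ++ [currSum]) []
  ans.sum

-- ===== PORT B =====
def findAllSubsetsSumBruteForce_alt (A : List Int) : Int :=
  PySem.Int.floordiv (2 ^ A.length) 2 * A.sum

-- ===== PRECONDITION & SPEC =====
def Spec_findAllSubsetsSumBruteForce (A : List Int) (out : Int) : Prop := out = findAllSubsetsSumBruteForce_alt A
instance (A : List Int) (out : Int) : Decidable (Spec_findAllSubsetsSumBruteForce A out) := by unfold Spec_findAllSubsetsSumBruteForce; infer_instance

-- ===== CLAIM (what is proved, stated in full; the proofs are below) =====
def Claim_equal_findAllSubsetsSumBruteForce : Prop := ∀ (A : List Int), Dom_findAllSubsetsSumBruteForce A → Spec_findAllSubsetsSumBruteForce A (findAllSubsetsSumBruteForce A)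

-- ===== LEMMAS AND PROOFS =====

-- the inner loop's conditional accumulation as a sum of a 0/1-selected map
theorem foldl_ite_add {α : Type} (p : α → Bool) (g : α → Int) (l : List α) (c : Int) :
    l.foldl (fun c j => if p j then c + g j else c) c
      = c + (l.map (fun j => if p j then g j else 0)).sum := by
  induction l generalizing c with
  | nil => simp
  | cons x t ih => simp only [List.foldl_cons, List.map_cons, List.sum_cons, ih]; split_ifs <;> ring

-- structural version of A's inner per-bit sum
def ssum : List Int → Nat → Int
  | [], _ => 0
  | a :: t, i => (if i % 2 = 1 then a else 0) + ssum t (i / 2)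

theorem checkBit_natCast (i j : Nat) : checkBit (i : Int) (j : Int) = i.testBit j := by
  unfold checkBit
  rw [Int.toNat_natCast, show ((i : Int) >>> j) = ((i >>> j : Nat) : Int) from by simp,
    show Int.land ((i >>> j : Nat) : Int) 1 = (((i >>> j) &&& 1 : Nat) : Int) from rfl,
    show ((i >>> j) &&& 1 : Nat) = i / 2 ^ j % 2 from by
      rw [Nat.and_one_is_mod, Nat.shiftRight_eq_div_pow]]
  rw [show i.testBit j = decide (i / 2 ^ j % 2 = 1) from by
    simp only [Nat.testBit, Nat.shiftRight_eq_div_pow]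
    by_cases hx : i / 2 ^ j % 2 = 1 <;> simp [hx]]
  by_cases h : i / 2 ^ j % 2 = 1
  · simp [h]
  · have hne : ¬ (((i / 2 ^ j % 2 : Nat) : Int) = 1) := by exact_mod_cast h
    simp [h]
    have hd : (2 : Nat) ∣ i / 2 ^ j := by omega
    rw [show ((i : Int) / 2 ^ j) = ((i / 2 ^ j : Nat) : Int) from by push_cast; rfl]
    exact_mod_cast hd

theorem inner_eq_ssum (A : List Int) (i : Nat) :
    ((List.range A.length).map (fun (j : Nat) => if checkBit (i : Int) (j : Int) then A.getD j 0 else 0)).sum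
      = ssum A i := by
  induction A generalizing i with
  | nil => simp [ssum]
  | cons a t ih =>
      simp only [List.length_cons, List.range_succ_eq_map, List.map_cons, List.sum_cons,
        List.map_map, ssum]
      rw [show ((List.range t.length).map
            ((fun (j : Nat) => if checkBit (i : Int) (j : Int) then (a :: t).getD j 0 else 0) ∘ Nat.succ))
          = (List.range t.length).map
            (fun (j : Nat) => if checkBit ((i / 2 : Nat) : Int) (j : Int) then t.getD j 0 else 0) from ?_,
        ih]
      · congr 1
        rw [checkBit_natCast]
        simp [Nat.testBit_zero]
      · apply List.map_congr_left
        intro j _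
        simp only [Function.comp, checkBit_natCast, Nat.testBit_succ]
        rfl

-- summing over range(2k) by pairing 2i and 2i+1
theorem sum_range_two_mul (f : Nat → Int) (k : Nat) :
    ((List.range (2 * k)).map f).sum
      = ((List.range k).map (fun i => f (2 * i) + f (2 * i + 1))).sum := by
  induction k with
  | zero => simp
  | succ k ih =>
      rw [show 2 * (k + 1) = (2 * k + 1) + 1 from by ring, List.range_succ, List.range_succ,
        List.range_succ]
      simp only [List.map_append, List.sum_append, List.map_cons, List.map_nil, List.sum_cons,
        List.sum_nil, ih]
      ring

theorem sum_map_affine (g : Nat → Int) (a : Int) (l : List Nat) :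
    (l.map (fun i => a + 2 * g i)).sum = l.length * a + 2 * (l.map g).sum := by
  induction l with
  | nil => simp
  | cons x t ih => simp [ih]; ring

theorem two_mul_tsum (A : List Int) :
    2 * ((List.range (2 ^ A.length)).map (ssum A)).sum = 2 ^ A.length * A.sum := by
  induction A with
  | nil => simp [ssum]
  | cons a t ih =>
      have h2 : (2 : Nat) ^ (a :: t).length = 2 * 2 ^ t.length := by
        simp [pow_succ]; ring
      have hterm : ∀ i : Nat, ssum (a :: t) (2 * i) + ssum (a :: t) (2 * i + 1)
          = a + 2 * ssum t i := by
        intro i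
        simp [ssum, Nat.mul_add_mod_self_left, Nat.mul_add_div]
        ring
      rw [h2, sum_range_two_mul, List.map_congr_left (fun i _ => hterm i), sum_map_affine,
        List.length_range]
      have hlen : ((a :: t).length : Nat) = t.length + 1 := rfl
      rw [show (a :: t).sum = a + t.sum from rfl, hlen]
      rw [mul_add, mul_add]
      rw [mul_left_comm (2 : Int) 2 ((List.map (ssum t) (List.range (2 ^ t.length))).sum), ih]
      push_cast
      ring

theorem portA_eq_tsum (A : List Int) :
    findAllSubsetsSumBruteForce A = ((List.range (2 ^ A.length)).map (ssum A)).sum := by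
  unfold findAllSubsetsSumBruteForce
  have hcast : ((2 : Int) ^ A.length) = ((2 ^ A.length : Nat) : Int) := by push_cast; rfl
  simp only [hcast, PySem.List.pyRange_zero_nat, PySem.List.foldl_append_singleton_eq_map,
    List.map_map, List.nil_append]
  congr 1
  apply List.map_congr_left
  intro k _
  simp only [Function.comp]
  rw [foldl_ite_add, zero_add, List.map_map]
  rw [show ((List.range A.length).map
        ((fun j => if checkBit (k : Int) j then PySem.List.pyGetD A j 0 else 0) ∘ (fun n : Nat => (n : Int))))
      = (List.range A.length).map
        (fun (j : Nat) => if checkBit (k : Int) (j : Int) then A.getD j 0 else 0) from ?_,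
    inner_eq_ssum]
  apply List.map_congr_left
  intro j hj
  simp [Function.comp, PySem.List.pyGetD_natCast]

-- ===== VERDICT (by name: the statement is the Claim_ definition above) =====
theorem findAllSubsetsSumBruteForce_spec : Claim_equal_findAllSubsetsSumBruteForce := by
  intro A _
  unfold Spec_findAllSubsetsSumBruteForce findAllSubsetsSumBruteForce_alt
  rw [portA_eq_tsum]
  cases A with
  | nil => simp [ssum, PySem.Int.floordiv]
  | cons a t =>
      have hpos : (0 : Int) < 2 := by norm_num
      rw [PySem.Int.floordiv_eq_ediv_of_pos hpos]
      have hdiv : ((2 : Int) ^ (a :: t).length) / 2 = 2 ^ t.length := by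
        rw [List.length_cons, pow_succ, Int.mul_ediv_cancel _ (by norm_num)]
      rw [hdiv]
      have h := two_mul_tsum (a :: t)
      have h2 : (2 : Int) ^ (a :: t).length * (a :: t).sum
          = 2 * (2 ^ t.length * (a :: t).sum) := by
        rw [List.length_cons, pow_succ]; ring
      rw [h2] at h
      exact mul_left_cancel₀ (by norm_num : (2:Int) ≠ 0) h
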